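-- pv_equiv track=rewrite | github.com/KCATurner/four | four/_fp_method.py | number_to_periods
-- ===== SOURCE A (Python) =====
-- def number_to_periods(number: int) -> list:
--     """
--     Convert an integer to a list of (P, R) tuples.
--
--     Args:
--         number (int): The integer to convert.
--
--     Returns:
--         A list of (P, R) tuples representing number.
--     """
--     periods = iter(f'{int(number):,}'.split(','))
--     result = [[next(periods).zfill(3), 1]]
--     for period in periods:
--         if period == result[-1][0]:
--             result[-1][1] += 1
--         else:
--             result.append([period, 1])
--     return [tuple(p) for p in result]
-- ===== SOURCE B (Python) =====
-- def number_to_periods(number: int) -> list: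
--     """
--     Convert an integer to a list of (P, R) tuples.
--
--     Zero-pad every comma-separated period up front (tail periods are
--     already 3 digits, so only the first can change), then run-length
--     encode by scanning run boundaries with an index.
--     """
--     ps = [p.zfill(3) for p in f'{int(number):,}'.split(',')]
--     result = []
--     i = 0
--     while i < len(ps):
--         j = i
--         while j < len(ps) and ps[j] == ps[i]:
--             j += 1
--         result.append((ps[i], j - i))
--         i = j
--     return result
-- ===== Notes on version B (the rewrite author's own statement) =====
-- stated objective: alternative
-- what changed: B zero-pads every period up front and run-length encodes by scanning run boundaries with two indices (emitting each (period, count) tuple once, complete), instead of A's compare-to-last accumulator that mutates the count of the last list entry and converts the lists to tuples at the end.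
import Mathlib
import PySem

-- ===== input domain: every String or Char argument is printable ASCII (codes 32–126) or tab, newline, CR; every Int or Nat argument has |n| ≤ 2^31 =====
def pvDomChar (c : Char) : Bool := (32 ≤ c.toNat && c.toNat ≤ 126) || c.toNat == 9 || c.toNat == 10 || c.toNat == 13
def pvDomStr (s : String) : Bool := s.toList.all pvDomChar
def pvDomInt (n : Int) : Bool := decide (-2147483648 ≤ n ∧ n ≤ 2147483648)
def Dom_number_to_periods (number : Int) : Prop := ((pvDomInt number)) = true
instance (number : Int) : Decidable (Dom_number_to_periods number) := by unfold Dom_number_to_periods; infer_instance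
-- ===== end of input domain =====

-- B differs from A only in decomposition (pre-pad + boundary scan vs compare-to-last accumulator); same values everywhere.

-- ===== PORT A =====
-- shared helper: f'{int(number):,}'.split(',') — the comma-grouped periods of the number.
-- pvChunksRev groups a REVERSED digit list into 3-digit chunks from the low end, chunks in left-to-right order.
def pvChunksRev (l : List Char) : List (List Char) :=
  if h : l = [] then [] else pvChunksRev (l.drop 3) ++ [(l.take 3).reverse]
termination_by l.length
decreasing_by
  have : l.length ≠ 0 := by simpa using ‹¬ l = []›
  simp [List.length_drop]; omega

def pvPeriods (n : Int) : List String :=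
  match pvChunksRev ((PySem.Int.toStr (n.natAbs : Int)).toList.reverse) with
  | [] => []
  | c :: cs => String.ofList (if n < 0 then '-' :: c else c) :: cs.map String.ofList

-- A's loop body: compare the incoming period to the last stored key (accumulator kept reversed).
def pvStep (acc : List (String × Int)) (period : String) : List (String × Int) :=
  match acc with
  | (p, c) :: t => if period == p then (p, c + 1) :: t else (period, 1) :: (p, c) :: t
  | [] => [(period, 1)]

def number_to_periods (number : Int) : List (String × Int) :=
  match pvPeriods number with
  | [] => []      -- unreachable: str(int) is never empty
  | first :: rest =>
      (rest.foldl pvStep [(PySem.Str.zfill first 3, 1)]).reverse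

-- ===== PORT B =====
-- B's run-length encoding: find the end of the run starting at the front, emit, continue after it.
def pvRle (l : List String) : List (String × Int) :=
  match l with
  | [] => []
  | x :: xs =>
      (x, 1 + ((xs.takeWhile (· == x)).length : Int)) :: pvRle (xs.dropWhile (· == x))
termination_by l.length
decreasing_by
  have := List.length_dropWhile_le (· == x) xs
  simp; omega

def number_to_periods_alt (number : Int) : List (String × Int) :=
  pvRle ((pvPeriods number).map (fun p => PySem.Str.zfill p 3))

-- ===== PRECONDITION & SPEC =====
def Spec_number_to_periods (number : Int) (out : List (String × Int)) : Prop := out = number_to_periods_alt number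
instance (number : Int) (out : List (String × Int)) : Decidable (Spec_number_to_periods number out) := by unfold Spec_number_to_periods; infer_instance

-- ===== CLAIM (what is proved, stated in full; the proofs are below) =====
def Claim_equal_number_to_periods : Prop := ∀ (number : Int), Dom_number_to_periods number → Spec_number_to_periods number (number_to_periods number)

-- ===== LEMMAS AND PROOFS =====

-- every chunk after the first has exactly 3 characters
theorem pvChunksRev_ne_nil (m : List Char) (h : m ≠ []) : pvChunksRev m ≠ [] := by
  rw [pvChunksRev]; simp [h]

theorem pvChunksRev_shape (l : List Char) :
    pvChunksRev l = [] ∨ ∃ c cs, pvChunksRev l = c :: cs ∧ ∀ x ∈ cs, x.length = 3 := by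
  induction l using pvChunksRev.induct with
  | case1 => left; rw [pvChunksRev]; simp
  | case2 l hl ih =>
      right
      rcases ih with h | ⟨c, cs, h, h3⟩
      · have hnil : l.drop 3 = [] := by
          by_contra hd
          exact pvChunksRev_ne_nil _ hd h
        refine ⟨(l.take 3).reverse, [], ?_, by simp⟩
        rw [pvChunksRev, dif_neg hl, h]; simp
      · have hne : l.drop 3 ≠ [] := by
          intro hn; rw [hn, pvChunksRev] at h; simp at h
        have hlen : 3 < l.length := by
          by_contra hle
          exact hne (List.drop_eq_nil_of_le (by omega))
        refine ⟨c, cs ++ [(l.take 3).reverse], ?_, ?_⟩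
        · rw [pvChunksRev, dif_neg hl, h]; simp
        · intro x hx
          rcases List.mem_append.mp hx with hx | hx
          · exact h3 x hx
          · simp at hx; subst hx; simp; omega

-- zfill is the identity on strings of length ≥ 3
theorem zfill_of_len_ge (s : String) (h : 3 ≤ s.toList.length) :
    PySem.Str.zfill s 3 = s := by
  have hl : PySem.Chars.zfill s.toList 3 = s.toList := by
    rw [PySem.Chars.zfill.eq_def, if_pos (by exact_mod_cast h)]
  have h2 := PySem.Str.toList_zfill s 3
  rw [hl] at h2
  calc PySem.Str.zfill s 3 = String.ofList (PySem.Str.zfill s 3).toList :=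
        String.ofList_toList.symm
    _ = String.ofList s.toList := by rw [h2]
    _ = s := String.ofList_toList

-- A's reversed-accumulator fold is the boundary-scan RLE
theorem foldl_pvStep (xs : List String) (x : String) (c : Int) (acc : List (String × Int)) :
    (xs.foldl pvStep ((x, c) :: acc)).reverse
      = acc.reverse ++ (x, c + ((xs.takeWhile (· == x)).length : Int))
          :: pvRle (xs.dropWhile (· == x)) := by
  induction xs generalizing x c acc with
  | nil => simp [pvRle]
  | cons y ys ih =>
      by_cases h : y == x
      · have hx : y = x := beq_iff_eq.mp h
        subst hx
        simp only [List.foldl_cons, pvStep, List.takeWhile_cons, List.dropWhile_cons,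
          beq_self_eq_true, if_true]
        rw [ih]
        simp; ring_nf
      · simp only [List.foldl_cons, pvStep, List.takeWhile_cons, List.dropWhile_cons, h,
          Bool.false_eq_true, if_false]
        rw [ih]
        simp [pvRle]

theorem main_eq (number : Int) : number_to_periods number = number_to_periods_alt number := by
  unfold number_to_periods number_to_periods_alt pvPeriods
  rcases pvChunksRev_shape ((PySem.Int.toStr ((number.natAbs : Nat) : Int)).toList.reverse)
    with h | ⟨c, cs, h, h3⟩
  · rw [h]; simp [pvRle]
  · rw [h]
    dsimp only
    have hmap : cs.map (fun d => PySem.Str.zfill (String.ofList d) 3)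
        = cs.map String.ofList := by
      apply List.map_congr_left
      intro d hd
      exact zfill_of_len_ge (String.ofList d) (by simp [h3 d hd])
    rw [List.map_cons, List.map_map,
      show ((fun p => PySem.Str.zfill p 3) ∘ String.ofList)
        = (fun d => PySem.Str.zfill (String.ofList d) 3) from rfl, hmap]
    rw [foldl_pvStep]
    simp [pvRle]

-- ===== VERDICT (by name: the statement is the Claim_ definition above) =====
theorem number_to_periods_spec : Claim_equal_number_to_periods := by
  intro number _
  unfold Spec_number_to_periods
  exact main_eq number
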